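-- pv_equiv track=rewrite | github.com/chloekoee/fit3155 | a1/q1/q1.py | construct_good_prefix_array
-- ===== SOURCE A (Python) =====
-- def calculate_z_array(string):
--     """
--     Computes the Z-array for a given string. The Z-array is a list where Z[i] represents the length
--     of the longest substring starting from S[i] that matches a prefix of S. Z[0] is defined as 0.
--
--     Parameters:
--     - string (str): The input string for which the Z-array is to be calculated.
--
--     Returns:
--     - list: The Z-array for the given string. Each element Z[i] contains the length of the longest
--       substring starting at S[i] which is also a prefix of S.
--     """
--     S = list(string)
--     Z = [0 for i in range(len(S))]
--     L = R = 0
--     ## take the z-value of the first character as 0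
--     Z[0] = 0
--
--     for K in range(1, len(S)):
--         ## outside current Z-box: calculate Z[K] by direct comparison
--         if K > R:
--             L = R = K
--             while R < len(S) and S[R] == S[R - L]:
--                 ## while no mismatch, keep expanding z-box
--                 R += 1
--             Z[K] = R - L
--             R -= 1
--
--         ## inside current Z-box: use previously calculated values
--         else:
--             kp = K - L  ## take the mirrored value position
--             dist = R - K + 1  ## distance to right edge of z-box
--
--             ## entire Z-box is within bounds
--             if Z[kp] < dist:
--                 Z[K] = Z[kp]
--
--             ## possible extension beyond current Z-box
--             else:
--                 L = K
--                 while R < len(S) and S[R] == S[R - L]: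
--                     R += 1
--                 Z[K] = R - L
--                 R -= 1
--
--     return Z
--
-- def construct_good_prefix_array(pat):
--     """
--     Constructs the 'good prefix' array. The array, gp, is defined
--     such that gp[i] contains the start position of the leftmost occurrence of the substring
--     pat[0...i] that is immediately followed by a character different from pat[i+1].
--
--     Parameters:
--     - pat (str): The pattern for which the 'good prefix' array is to be calculated.
--
--     Returns:
--     - gp (list): The 'good prefix' array, where gp[i] holds the start position of the leftmost
--     occurrence of pat[0...i] and is followed by a character not matching pat[i+1], or -1 if no such prefix exists.
--     The last element, gp[-1], is specifically set to support the scenario where there is a mismatch on the first character (i = 0)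
--     and gp[1-1] = gp[-1] is taken to calculate the good prefix shift.
--     """
--     m = len(pat)
--     zp = calculate_z_array(pat)
--     gp = [-1 for i in range(m + 1)]
--
--     ## iterate in reverse to construct gp based on Z-array findings
--     for p in range(m - 1, -1, -1):
--         ## if a prefix match exists starting at pat[p]
--         if zp[p] > 0:
--             ## calculate end position of the matching prefix
--             j = zp[p] - 1
--             ## update gp with the start position of this prefix
--             gp[j] = p
--
--     gp[-1] = 1  ## if the mismatch occurred at i = 0, shift to character on the right
--     return gp
-- ===== SOURCE B (Python) =====
-- def construct_good_prefix_array(pat):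
--     # Single reverse pass; for each start p the prefix-match length is found by
--     # naive character comparison (no Z-box bookkeeping, no intermediate Z array).
--     m = len(pat)
--     gp = [-1] * (m + 1)
--     for p in range(m - 1, 0, -1):
--         k = 0
--         while p + k < m and pat[p + k] == pat[k]:
--             k += 1
--         if k > 0:
--             gp[k - 1] = p
--     gp[m] = 1
--     return gp
-- ===== Notes on version B (the rewrite author's own statement) =====
-- stated objective: simpler
-- what changed: Replaces the linear L/R Z-box algorithm plus separate Z-array with a single reverse pass that computes each prefix-match length by naive direct character comparison inline.
import Mathlib
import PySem

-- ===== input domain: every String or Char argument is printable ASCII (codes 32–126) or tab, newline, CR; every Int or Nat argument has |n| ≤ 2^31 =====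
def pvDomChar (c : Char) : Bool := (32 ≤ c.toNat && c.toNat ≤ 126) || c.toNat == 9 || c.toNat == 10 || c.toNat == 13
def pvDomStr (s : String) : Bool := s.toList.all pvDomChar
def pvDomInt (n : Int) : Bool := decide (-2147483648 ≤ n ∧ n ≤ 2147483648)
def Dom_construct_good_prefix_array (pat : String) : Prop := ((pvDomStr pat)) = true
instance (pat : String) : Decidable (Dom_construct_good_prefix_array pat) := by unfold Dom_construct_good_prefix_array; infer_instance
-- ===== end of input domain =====

-- B replaces A's linear L/R Z-box algorithm (separate Z array) by a single reverse pass that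
-- computes each prefix-match length by naive direct comparison inline (simpler, not faster).

-- ===== PORT A =====

-- the inner `while R < len(S) and S[R] == S[R-L]: R += 1` loop of calculate_z_array
def extendR (S : List Char) (L R : Nat) : Nat :=
  if h : R < S.length ∧ S.getD R ' ' = S.getD (R - L) ' ' then
    extendR S L (R + 1)
  else R
termination_by S.length - R
decreasing_by omega

-- one iteration of the `for K in range(1, len(S))` loop; state = (Z, L, R)
def zStep (S : List Char) (st : List Nat × Nat × Nat) (K : Nat) : List Nat × Nat × Nat :=
  match st with
  | (Z, L, R) =>
    if K > R then
      let Rn := extendR S K K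
      (Z.set K (Rn - K), K, Rn - 1)
    else
      let kp := K - L
      let dist := R - K + 1
      if Z.getD kp 0 < dist then (Z.set K (Z.getD kp 0), L, R)
      else
        let Rn := extendR S K R
        (Z.set K (Rn - K), K, Rn - 1)

-- calculate_z_array; `Z = [0]*len(S)` already makes Z[0] = 0 (Python's `Z[0] = 0` raises on "",
-- excluded by Pre_); range(1, len(S)) is List.range' 1 (len-1)
def calculate_z_array (pat : String) : List Nat :=
  let S := pat.toList
  ((List.range' 1 (S.length - 1)).foldl (zStep S) (List.replicate S.length 0, 0, 0)).1

-- construct_good_prefix_array; range(m-1, -1, -1) is (List.range m).reverse; gp[-1] is index m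
def construct_good_prefix_array (pat : String) : List Int :=
  let m := pat.toList.length
  let zp := calculate_z_array pat
  let gp0 := List.replicate (m + 1) (-1 : Int)
  let gp := ((List.range m).reverse).foldl
      (fun g p => if zp.getD p 0 > 0 then g.set (zp.getD p 0 - 1) (p : Int) else g) gp0
  gp.set m 1

-- ===== PORT B =====

-- the `while p + k < m and pat[p+k] == pat[k]: k += 1` loop of B
def lcpLen (S : List Char) (p k : Nat) : Nat :=
  if h : p + k < S.length ∧ S.getD (p + k) ' ' = S.getD k ' ' then lcpLen S p (k + 1) else k
termination_by S.length - (p + k)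
decreasing_by omega

-- B: single reverse pass p = m-1 … 1, i.e. (List.range' 1 (m-1)).reverse
def construct_good_prefix_array_alt (pat : String) : List Int :=
  let S := pat.toList
  let m := S.length
  let gp0 := List.replicate (m + 1) (-1 : Int)
  let gp := ((List.range' 1 (m - 1)).reverse).foldl
      (fun g p =>
        let k := lcpLen S p 0
        if k > 0 then g.set (k - 1) (p : Int) else g) gp0
  gp.set m 1

-- ===== PRECONDITION & SPEC =====
-- Pre_ excludes only the empty pattern, on which A raises IndexError (Z[0] = 0 on an empty list).
def Pre_construct_good_prefix_array (pat : String) : Prop := pat ≠ ""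
instance (pat : String) : Decidable (Pre_construct_good_prefix_array pat) := by
  unfold Pre_construct_good_prefix_array; infer_instance

def pvWitness_construct_good_prefix_array : String := "abab"

def Spec_construct_good_prefix_array (pat : String) (out : List Int) : Prop := out = construct_good_prefix_array_alt pat
instance (pat : String) (out : List Int) : Decidable (Spec_construct_good_prefix_array pat out) := by unfold Spec_construct_good_prefix_array; infer_instance

-- ===== CLAIM (what is proved, stated in full; the proofs are below) =====
def Claim_equal_construct_good_prefix_array : Prop := ∀ (pat : String), Dom_construct_good_prefix_array pat → Pre_construct_good_prefix_array pat → Spec_construct_good_prefix_array pat (construct_good_prefix_array pat)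
-- ===== LEMMAS AND PROOFS =====

-- ---- basic facts about lcpLen (B's naive matcher, also the specification value) ----

theorem lcpLen_match (S : List Char) (p k : Nat) :
    ∀ i, k ≤ i → i < lcpLen S p k →
      p + i < S.length ∧ S.getD (p + i) ' ' = S.getD i ' ' := by
  fun_induction lcpLen with
  | case1 k h ih =>
      intro i hki hlt
      rcases Nat.eq_or_lt_of_le hki with rfl | hki'
      · exact h
      · exact ih i hki' hlt
  | case2 k h =>
      intro i hki hlt; omega

theorem lcpLen_stop (S : List Char) (p k : Nat) :
    ¬ (p + lcpLen S p k < S.length ∧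
       S.getD (p + lcpLen S p k) ' ' = S.getD (lcpLen S p k) ' ') := by
  fun_induction lcpLen with
  | case1 k h ih => exact ih
  | case2 k h => exact h

-- characterization: the naive match length is the unique r with match below r and a stop at r
theorem lcpLen_eq (S : List Char) (p k r : Nat) (hkr : k ≤ r)
    (hm : ∀ i, k ≤ i → i < r → p + i < S.length ∧ S.getD (p + i) ' ' = S.getD i ' ')
    (hs : ¬ (p + r < S.length ∧ S.getD (p + r) ' ' = S.getD r ' ')) :
    lcpLen S p k = r := by
  fun_induction lcpLen with
  | case1 k h ih =>
      have hkr' : k < r := by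
        rcases Nat.eq_or_lt_of_le hkr with rfl | h' ; · exact absurd h hs
        · exact h'
      exact ih hkr' (fun i hi1 hi2 => hm i (by omega) hi2)
  | case2 k h =>
      rcases Nat.eq_or_lt_of_le hkr with rfl | h'
      · rfl
      · exact absurd (hm k le_rfl h') h

-- extendR computes L + (naive match length from L), given the part [L, R) already matches
theorem extendR_ge (S : List Char) (L R : Nat) : R ≤ extendR S L R := by
  fun_induction extendR with
  | case1 R h ih => omega
  | case2 R h => omega

theorem extendR_match (S : List Char) (L R : Nat) :
    ∀ i, R ≤ i → i < extendR S L R →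
      i < S.length ∧ S.getD i ' ' = S.getD (i - L) ' ' := by
  fun_induction extendR with
  | case1 R h ih =>
      intro i hRi hlt
      rcases Nat.eq_or_lt_of_le hRi with rfl | h'
      · exact h
      · exact ih i h' hlt
  | case2 R h => intro i h1 h2; omega

theorem extendR_stop (S : List Char) (L R : Nat) :
    ¬ (extendR S L R < S.length ∧
       S.getD (extendR S L R) ' ' = S.getD (extendR S L R - L) ' ') := by
  fun_induction extendR with
  | case1 R h ih => exact ih
  | case2 R h => exact h

theorem extendR_eq (S : List Char) (L R : Nat) (hLR : L ≤ R)
    (hm : ∀ i, L ≤ i → i < R → i < S.length ∧ S.getD i ' ' = S.getD (i - L) ' ') :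
    extendR S L R = L + lcpLen S L 0 := by
  have hE : R ≤ extendR S L R := extendR_ge S L R
  have h1 : lcpLen S L 0 = extendR S L R - L := by
    apply lcpLen_eq S L 0 _ (Nat.zero_le _)
    · intro i _ hi
      have hiE : L + i < extendR S L R := by omega
      by_cases hiR : L + i < R
      · have := hm (L + i) (by omega) hiR
        simpa [Nat.add_sub_cancel_left] using this
      · have := extendR_match S L R (L + i) (by omega) hiE
        simpa [Nat.add_sub_cancel_left] using this
    · intro hcon
      apply extendR_stop S L R
      have hEL : L + (extendR S L R - L) = extendR S L R := by omega
      rw [hEL] at hcon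
      exact ⟨hcon.1, by rw [hcon.2]⟩
  omega

-- ---- the Z-algorithm invariant ----

-- the Z-box [L, R] matches the prefix
def BoxMatch (S : List Char) (L R : Nat) : Prop :=
  ∀ i, L ≤ i → i ≤ R → i < S.length ∧ S.getD i ' ' = S.getD (i - L) ' '

-- specification value of A's Z-array entries (Z[0] is pinned to 0 by the Python code)
def zSpec (S : List Char) (j : Nat) : Nat := if j = 0 then 0 else lcpLen S j 0

def ZInv (S : List Char) (K : Nat) (st : List Nat × Nat × Nat) : Prop :=
  st.1.length = S.length ∧
  (∀ j, j < K → st.1.getD j 0 = zSpec S j) ∧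
  st.2.1 ≤ st.2.2 + 1 ∧
  (1 ≤ st.2.1 ∨ (st.2.1 = 0 ∧ st.2.2 = 0)) ∧
  st.2.1 < K ∧
  BoxMatch S st.2.1 st.2.2

theorem getD_set_lt {l : List Nat} {i j v : Nat} (h : j < i) :
    (l.set i v).getD j 0 = l.getD j 0 := by
  simp [List.getD, List.getElem?_set_ne (by omega : i ≠ j)]

theorem getD_set_self {l : List Nat} {i v : Nat} (h : i < l.length) :
    (l.set i v).getD i 0 = v := by
  simp [List.getD, h]

theorem zStep_inv (S : List Char) (K : Nat) (st : List Nat × Nat × Nat)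
    (hK1 : 1 ≤ K) (hKn : K < S.length) (h : ZInv S K st) :
    ZInv S (K + 1) (zStep S st K) := by
  obtain ⟨Z, L, R⟩ := st
  obtain ⟨hlen, hZ, hLR, hL1, hLK, hbox⟩ := h
  simp only [ZInv] at *
  unfold zStep
  by_cases hKR : K > R
  · -- branch 1: outside the box
    simp only [if_pos hKR]
    have hE : extendR S K K = K + lcpLen S K 0 :=
      extendR_eq S K K le_rfl (by intro i h1 h2; omega)
    have hEge : K ≤ extendR S K K := extendR_ge S K K
    refine ⟨by simpa using hlen, ?_, by omega, by omega, by omega, ?_⟩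
    · intro j hj
      rcases Nat.lt_or_ge j K with hjK | hjK
      · rw [getD_set_lt hjK]; exact hZ j hjK
      · have hjK' : j = K := by omega
        subst hjK'
        rw [getD_set_self (by omega)]
        simp only [zSpec, if_neg (show ¬ j = 0 by omega)]
        omega
    · intro i h1 h2
      exact extendR_match S K K i h1 (by omega)
  · -- inside the box
    simp only [if_neg hKR]
    have hKR' : K ≤ R := by omega
    have hL : 1 ≤ L := by
      rcases hL1 with h | h
      · exact h
      · omega
    set kp := K - L with hkp
    have hkpK : kp < K := by omega
    have hkp0 : kp ≠ 0 := by omega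
    have hZkp : Z.getD kp 0 = lcpLen S kp 0 := by
      have := hZ kp hkpK; simpa [zSpec, hkp0] using this
    have hRn : R < S.length := (hbox R (by omega) le_rfl).1
    by_cases hcase : Z.getD kp 0 < R - K + 1
    · -- branch 2: copy the mirrored value
      simp only [if_pos hcase]
      set v := Z.getD kp 0 with hv
      have hvz : lcpLen S K 0 = v := by
        apply lcpLen_eq S K 0 v (Nat.zero_le _)
        · intro i _ hiv
          have hKiR : K + i ≤ R := by omega
          have hb := hbox (K + i) (by omega) hKiR
          have hm := lcpLen_match S kp 0 i (Nat.zero_le _) (by omega)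
          refine ⟨hb.1, ?_⟩
          have : K + i - L = kp + i := by omega
          rw [hb.2, this, hm.2]
        · intro hcon
          have hKvR : K + v ≤ R := by omega
          have hb := hbox (K + v) (by omega) hKvR
          have hs := lcpLen_stop S kp 0
          rw [← hZkp] at hs
          apply hs
          refine ⟨by omega, ?_⟩
          have h1 : K + v - L = kp + v := by omega
          rw [← h1, ← hb.2, hcon.2]
      refine ⟨by simpa using hlen, ?_, by omega, by omega, by omega, hbox⟩
      intro j hj
      rcases Nat.lt_or_ge j K with hjK | hjK
      · rw [getD_set_lt hjK]; exact hZ j hjK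
      · have hjK' : j = K := by omega
        subst hjK'
        rw [getD_set_self (by omega)]
        simp only [zSpec, if_neg (show ¬ j = 0 by omega)]
        omega
    · -- branch 3: extend from R with the new left end K
      simp only [if_neg hcase]
      have hzkp : R - K + 1 ≤ lcpLen S kp 0 := by omega
      have hm : ∀ i, K ≤ i → i < R → i < S.length ∧ S.getD i ' ' = S.getD (i - K) ' ' := by
        intro i h1 h2
        have hb := hbox i (by omega) (by omega)
        have hmatch := lcpLen_match S kp 0 (i - K) (Nat.zero_le _) (by omega)
        refine ⟨hb.1, ?_⟩
        have he1 : i - L = kp + (i - K) := by omega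
        rw [hb.2, he1, hmatch.2]
      have hE : extendR S K R = K + lcpLen S K 0 := extendR_eq S K R hKR' hm
      have hEge : R ≤ extendR S K R := extendR_ge S K R
      refine ⟨by simpa using hlen, ?_, by omega, by omega, by omega, ?_⟩
      · intro j hj
        rcases Nat.lt_or_ge j K with hjK | hjK
        · rw [getD_set_lt hjK]; exact hZ j hjK
        · have hjK' : j = K := by omega
          subst hjK'
          rw [getD_set_self (by omega)]
          simp only [zSpec, if_neg (show ¬ j = 0 by omega)]
          omega
      · intro i h1 h2
        have hiE : i < extendR S K R := by omega
        rcases Nat.lt_or_ge i R with hiR | hiR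
        · exact hm i h1 hiR
        · exact extendR_match S K R i hiR hiE

theorem fold_zInv (S : List Char) (c : Nat) :
    ∀ K st, 1 ≤ K → K + c = S.length → ZInv S K st →
      ZInv S S.length ((List.range' K c).foldl (zStep S) st) := by
  induction c with
  | zero => intro K st h1 h2 h3; simpa [← h2] using h3
  | succ c ih =>
      intro K st h1 h2 h3
      rw [List.range'_succ, List.foldl_cons]
      exact ih (K + 1) (zStep S st K) (by omega) (by omega)
        (zStep_inv S K st h1 (by omega) h3)

theorem calculate_z_array_spec (pat : String) (hne : pat.toList ≠ []) :
    ∀ p, p < pat.toList.length →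
      (calculate_z_array pat).getD p 0 = zSpec pat.toList p := by
  intro p hp
  have hn : 0 < pat.toList.length := List.length_pos_of_ne_nil hne
  have hinv : ZInv pat.toList 1 (List.replicate pat.toList.length 0, 0, 0) := by
    refine ⟨by simp, ?_, Nat.zero_le _, Or.inr ⟨rfl, rfl⟩, Nat.one_pos, ?_⟩
    · intro j hj
      have hj0 : j = 0 := by omega
      subst hj0
      simp [zSpec, List.getD]
    · intro i h1 h2
      have hi0 : i = 0 := Nat.le_zero.mp h2
      subst hi0
      exact ⟨hn, rfl⟩
  have hfold := fold_zInv pat.toList (pat.toList.length - 1) 1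
    (List.replicate pat.toList.length 0, 0, 0) le_rfl (by omega) hinv
  simp only [calculate_z_array]
  exact hfold.2.1 p hp

-- ---- folding the gp construction ----

theorem range_reverse_split (n : Nat) (hn : 0 < n) :
    (List.range n).reverse = (List.range' 1 (n - 1)).reverse ++ [0] := by
  obtain ⟨n', rfl⟩ : ∃ n', n = n' + 1 := ⟨n - 1, by omega⟩
  rw [List.range_eq_range', List.range'_succ, List.reverse_cons]
  simp

theorem gp_fold_eq (pat : String) (hne : pat.toList ≠ []) :
    construct_good_prefix_array pat = construct_good_prefix_array_alt pat := by
  have hn : 0 < pat.toList.length := List.length_pos_of_ne_nil hne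
  have hzp := calculate_z_array_spec pat hne
  have h0 : (calculate_z_array pat).getD 0 0 = 0 := (hzp 0 hn).trans rfl
  simp only [construct_good_prefix_array, construct_good_prefix_array_alt]
  rw [range_reverse_split _ hn, List.foldl_append, List.foldl_cons, List.foldl_nil,
    h0, if_neg (by omega)]
  congr 1
  apply PySem.List.foldl_congr_mem'
  intro q hq acc
  rw [List.mem_reverse, List.mem_range'_1] at hq
  rw [hzp q (by omega)]
  simp only [zSpec, if_neg (show ¬ q = 0 by omega)]

-- ===== VERDICT (by name: the statement is the Claim_ definition above) =====
theorem construct_good_prefix_array_spec : Claim_equal_construct_good_prefix_array := by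
  intro pat _ hpre
  unfold Spec_construct_good_prefix_array
  have hne : pat.toList ≠ [] := fun h => hpre (String.toList_eq_nil_iff.mp h)
  exact gp_fold_eq pat hne
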